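-- pv_equiv track=rewrite | github.com/bibekmaharjan77/DDP-Under-Predictions | previous_codes/run107.py | generate_type1_submeshes
-- ===== SOURCE A (Python) =====
-- import math
-- from collections import defaultdict
--
-- def generate_type1_submeshes(size):
--     levels = int(math.log2(size)) + 1
--     hierarchy = defaultdict(list)
--     for level in range(levels):
--         block_size = 2 ** level
--         for i in range(0, size, block_size):
--             for j in range(0, size, block_size):
--                 nodes = set((x, y) for x in range(i, min(i+block_size, size))
--                                      for y in range(j, min(j+block_size, size)))
--                 hierarchy[(level, 2)].append(nodes)
--     return hierarchy
-- ===== SOURCE B (Python) =====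
-- import math
-- from collections import defaultdict
--
-- def generate_type1_submeshes(size):
--     levels = int(math.log2(size)) + 1
--     hierarchy = defaultdict(list)
--     for level in range(levels):
--         block_size = 2 ** level
--         ncols = -(-size // block_size)  # ceil(size / block_size)
--         buckets = [set() for _ in range(ncols * ncols)]
--         for x in range(size):
--             xb = (x // block_size) * ncols
--             for y in range(size):
--                 buckets[xb + y // block_size].add((x, y))
--         hierarchy[(level, 2)] = buckets
--     return hierarchy
-- ===== Notes on version B (the rewrite author's own statement) =====
-- stated objective: alternative
-- what changed: Instead of recomputing every block as a double range comprehension with min-clamping (block -> coordinates), B makes one bucketing pass per level over the grid, sending each coordinate to its block by integer division (coordinate -> block), which reproduces the same sets in the same order.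
import Mathlib
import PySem

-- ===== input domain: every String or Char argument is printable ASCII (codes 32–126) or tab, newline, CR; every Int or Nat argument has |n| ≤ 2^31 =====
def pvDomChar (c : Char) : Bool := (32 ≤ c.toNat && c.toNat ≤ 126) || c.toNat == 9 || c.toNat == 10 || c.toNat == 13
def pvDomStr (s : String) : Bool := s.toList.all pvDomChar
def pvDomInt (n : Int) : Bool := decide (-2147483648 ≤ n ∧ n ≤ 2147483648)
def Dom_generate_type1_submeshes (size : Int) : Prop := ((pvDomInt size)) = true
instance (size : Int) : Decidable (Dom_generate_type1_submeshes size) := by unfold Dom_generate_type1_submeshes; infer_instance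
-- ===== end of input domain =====

-- B replaces the per-block coordinate comprehensions by one bucketing pass per level
-- (each coordinate is sent to its block by integer division); equivalence is about the return value.

-- ===== PORT A =====
-- int(math.log2(size)) is ported as Nat.log2 size.toNat: exact for 1 ≤ size ≤ 2^31 (doubles are exact there).
-- 2 ** level with 0 ≤ level is 2 ^ level.toNat; the defaultdict append is Dict.modify with default [].
-- The final .map flattens each ((level, 2), blocks) entry into the required (Int × Int × _) tuple shape.
def generate_type1_submeshes (size : Int) : List (Int × Int × List (List (Int × Int))) :=
  let levels : Int := (Nat.log2 size.toNat : Int) + 1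
  ((PySem.List.pyRange 0 levels 1).foldl (fun h level =>
      let block_size : Int := 2 ^ level.toNat
      (PySem.List.pyRange 0 size block_size).foldl (fun h i =>
        (PySem.List.pyRange 0 size block_size).foldl (fun h j =>
          PySem.Dict.modify h (level, 2) [] (fun l => l ++
            [PySem.Set.ofList ((PySem.List.pyRange i (min (i + block_size) size) 1).flatMap
              (fun x => (PySem.List.pyRange j (min (j + block_size) size) 1).map (fun y => (x, y))))]))
          h) h)
    (PySem.Dict.empty : PySem.Dict (Int × Int) (List (List (Int × Int))))).items.map
    (fun kv => (kv.1.1, kv.1.2, kv.2))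

-- ===== PORT B =====
-- Transliteration of Source B: per level, ceil-division ncols, a flat list of empty sets,
-- then one pass over all coordinates adding each (x, y) to its bucket (list indexing via pyGetD/pySetD,
-- always in range for size ≥ 1).
def generate_type1_submeshes_alt (size : Int) : List (Int × Int × List (List (Int × Int))) :=
  let levels : Int := (Nat.log2 size.toNat : Int) + 1
  ((PySem.List.pyRange 0 levels 1).foldl (fun h level =>
      let block_size : Int := 2 ^ level.toNat
      let ncols : Int := -(PySem.Int.floordiv (-size) block_size)
      PySem.Dict.insert h (level, 2)
        ((PySem.List.pyRange 0 size 1).foldl (fun bkts x =>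
            let xb : Int := PySem.Int.floordiv x block_size * ncols
            (PySem.List.pyRange 0 size 1).foldl (fun bkts y =>
              PySem.List.pySetD bkts (xb + PySem.Int.floordiv y block_size)
                (PySem.Set.add (PySem.List.pyGetD bkts (xb + PySem.Int.floordiv y block_size) PySem.Set.empty) (x, y)))
              bkts)
          (List.replicate (ncols * ncols).toNat (PySem.Set.empty : PySem.Set (Int × Int)))))
    (PySem.Dict.empty : PySem.Dict (Int × Int) (List (List (Int × Int))))).items.map
    (fun kv => (kv.1.1, kv.1.2, kv.2))

-- ===== PRECONDITION & SPEC =====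
-- Pre_ excludes exactly size ≤ 0, where math.log2 raises (ValueError / math domain error).
def Pre_generate_type1_submeshes (size : Int) : Prop := 1 ≤ size
instance (size : Int) : Decidable (Pre_generate_type1_submeshes size) := by unfold Pre_generate_type1_submeshes; infer_instance
def pvWitness_generate_type1_submeshes : Int := 3
def Spec_generate_type1_submeshes (size : Int) (out : List (Int × Int × List (List (Int × Int)))) : Prop := out = generate_type1_submeshes_alt size
instance (size : Int) (out : List (Int × Int × List (List (Int × Int)))) : Decidable (Spec_generate_type1_submeshes size out) := by unfold Spec_generate_type1_submeshes; infer_instance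

-- ===== CLAIM (what is proved, stated in full; the proofs are below) =====
def Claim_equal_generate_type1_submeshes : Prop := ∀ (size : Int), Dom_generate_type1_submeshes size → Pre_generate_type1_submeshes size → Spec_generate_type1_submeshes size (generate_type1_submeshes size)

-- ===== LEMMAS AND PROOFS =====

-- The level-(block_size) block list as A computes it: blocks in i-outer/j-inner corner order.
def pvNodes (n bs i j : Int) : List (Int × Int) :=
  PySem.Set.ofList ((PySem.List.pyRange i (min (i + bs) n) 1).flatMap
    (fun x => (PySem.List.pyRange j (min (j + bs) n) 1).map (fun y => (x, y))))

def pvBlocksA (n bs : Int) : List (List (Int × Int)) :=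
  (PySem.List.pyRange 0 n bs).flatMap (fun i => (PySem.List.pyRange 0 n bs).map (fun j => pvNodes n bs i j))

-- The level-(block_size) bucket list as B computes it.
def pvIdx (bs nc : Int) (c : Int × Int) : Int :=
  PySem.Int.floordiv c.1 bs * nc + PySem.Int.floordiv c.2 bs

def pvBucketsB (n bs : Int) : List (List (Int × Int)) :=
  let nc : Int := -(PySem.Int.floordiv (-n) bs)
  ((PySem.List.pyRange 0 n 1).flatMap (fun x => (PySem.List.pyRange 0 n 1).map (fun y => (x, y)))).foldl
    (fun st c => PySem.List.pySetD st (pvIdx bs nc c)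
      (PySem.Set.add (PySem.List.pyGetD st (pvIdx bs nc c) PySem.Set.empty) c))
    (List.replicate (nc * nc).toNat (PySem.Set.empty : PySem.Set (Int × Int)))

lemma getD_set_list {α : Type} (l : List (List α)) (k t : Nat) (v : List α) :
    (l.set k v).getD t [] = if t = k ∧ k < l.length then v else l.getD t [] := by
  simp only [List.getD_eq_getElem?_getD, List.getElem?_set]
  split_ifs with h1 h2 h3 <;> simp_all

lemma getD_replicate_nil {α : Type} [BEq α] (m t : Nat) :
    (List.replicate m (PySem.Set.empty : PySem.Set α)).getD t [] = [] := by
  simp only [PySem.Set.empty, List.getD_eq_getElem?_getD, List.getElem?_replicate]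
  split_ifs <;> rfl

-- the bucketing pass: final bucket t holds exactly the (still-uninserted) elements mapped to t, in pass order
lemma bucket_fold (idx : Int × Int → Int) :
    ∀ (xs : List (Int × Int)) (st : List (List (Int × Int))),
      xs.Nodup →
      (∀ c ∈ xs, 0 ≤ idx c ∧ (idx c).toNat < st.length) →
      (∀ c ∈ xs, c ∉ st.getD (idx c).toNat []) →
      (xs.foldl (fun st c => PySem.List.pySetD st (idx c)
          (PySem.Set.add (PySem.List.pyGetD st (idx c) PySem.Set.empty) c)) st).length = st.length ∧
      ∀ t : Nat, (xs.foldl (fun st c => PySem.List.pySetD st (idx c)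
          (PySem.Set.add (PySem.List.pyGetD st (idx c) PySem.Set.empty) c)) st).getD t []
        = st.getD t [] ++ xs.filter (fun c => decide ((idx c).toNat = t)) := by
  intro xs
  induction xs with
  | nil => intro st _ _ _; simp
  | cons c xs ih =>
    intro st hnd hb hni
    obtain ⟨h0, hlt⟩ := hb c (by simp)
    have hiLt : idx c < (st.length : Int) := by omega
    have hget : PySem.List.pyGetD st (idx c) PySem.Set.empty = st.getD (idx c).toNat [] := by
      rw [PySem.List.pyGetD_eq_getElem st _ h0 hiLt, List.getD_eq_getElem _ _ hlt]
    have hadd : PySem.Set.add (st.getD (idx c).toNat []) c = st.getD (idx c).toNat [] ++ [c] :=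
      PySem.Set.add_of_not_mem (hni c (by simp))
    have hstep : PySem.List.pySetD st (idx c)
        (PySem.Set.add (PySem.List.pyGetD st (idx c) PySem.Set.empty) c)
        = st.set (idx c).toNat (st.getD (idx c).toNat [] ++ [c]) := by
      rw [hget, hadd, PySem.List.pySetD_of_nonneg st _ h0]
    set st' := st.set (idx c).toNat (st.getD (idx c).toNat [] ++ [c]) with hst'
    have hlen' : st'.length = st.length := by simp [hst']
    have hrec := ih st' (hnd.of_cons)
      (by intro d hd; have := hb d (by simp [hd]); omega)
      (by
        intro d hd
        rw [hst', getD_set_list]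
        split_ifs with h
        · intro hmem
          rcases List.mem_append.mp hmem with h1 | h1
          · exact hni d (by simp [hd]) (by rw [h.1]; exact h1)
          · have : d = c := by simpa using h1
            exact (List.nodup_cons.mp hnd).1 (this ▸ hd)
        · exact hni d (by simp [hd]))
    refine ⟨?_, ?_⟩
    · rw [List.foldl_cons, hstep, hrec.1, hlen']
    · intro t
      rw [List.foldl_cons, hstep, hrec.2 t, hst', getD_set_list]
      by_cases ht : t = (idx c).toNat
      · subst ht
        rw [if_pos (show (idx c).toNat = (idx c).toNat ∧ (idx c).toNat < st.length from ⟨rfl, hlt⟩)]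
        simp [List.append_assoc]
      · rw [if_neg (fun hh => ht hh.1)]
        simp only [List.filter_cons, decide_eq_true_eq]
        rw [if_neg (fun hh => ht hh.symm)]

lemma flatMap_if {α β : Type} (p : α → Bool) (g : α → List β) (l : List α) :
    l.flatMap (fun x => if p x then g x else []) = (l.filter p).flatMap g := by
  induction l with
  | nil => simp
  | cons a l ih => by_cases h : p a <;> simp [h, ih]

lemma map_range_mul {β : Type} (A B : Nat) (g : Nat → β) :
    (List.range (A * B)).map g
      = (List.range A).flatMap (fun i => (List.range B).map (fun j => g (i * B + j))) := by
  induction A with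
  | zero => simp
  | succ A ih =>
    rw [show (A + 1) * B = A * B + B by ring, List.range_add, List.map_append, ih,
      List.range_succ, List.flatMap_append]
    simp [List.map_map, Function.comp]

lemma eq_of_pairwise_lt_of_perm (xs ys : List Int) (hp : xs.Perm ys)
    (h1 : List.Pairwise (· < ·) xs) (h2 : List.Pairwise (· < ·) ys) : xs = ys := by
  have e1 := PySem.List.sorted_eq_of_perm_of_pairwise_lt xs xs (fun x => x) (List.Perm.refl xs) h1
  have e2 := PySem.List.sorted_eq_of_perm_of_pairwise_lt xs ys (fun x => x) hp.symm h2
  exact e1.symm.trans e2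

-- filtering [0, n) by x // bs == q cuts out the q-th stripe
lemma filter_div_range (n bs q : Int) (hbs : 0 < bs) (hq : 0 ≤ q) :
    (PySem.List.pyRange 0 n 1).filter (fun x => decide (PySem.Int.floordiv x bs = q))
      = PySem.List.pyRange (q * bs) (min (q * bs + bs) n) 1 := by
  have hqb : 0 ≤ q * bs := mul_nonneg hq hbs.le
  apply eq_of_pairwise_lt_of_perm
  · refine (List.perm_ext_iff_of_nodup (List.Nodup.filter _ (PySem.List.nodup_pyRange_one 0 n))
      (PySem.List.nodup_pyRange_one _ _)).mpr ?_
    intro x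
    simp only [List.mem_filter, PySem.List.mem_pyRange_one, decide_eq_true_eq, lt_min_iff]
    rw [PySem.Int.floordiv_eq_iff_of_pos hbs]
    have hmul : (q + 1) * bs = q * bs + bs := by ring
    constructor
    · rintro ⟨⟨hx0, hxn⟩, hlo, hhi⟩; exact ⟨hlo, by linarith, hxn⟩
    · rintro ⟨hlo, hhi, hn'⟩; exact ⟨⟨by linarith, hn'⟩, hlo, by linarith⟩
  · exact List.Pairwise.sublist (List.filter_sublist) (PySem.List.pairwise_lt_pyRange_one 0 n)
  · exact PySem.List.pairwise_lt_pyRange_one _ _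

lemma idx_unique (nc a r qi qj : Int) (_ha : 0 ≤ a) (hr0 : 0 ≤ r) (hr : r < nc)
    (hqi : 0 ≤ qi) (hqj0 : 0 ≤ qj) (hqj : qj < nc) :
    a * nc + r = qi * nc + qj ↔ a = qi ∧ r = qj := by
  constructor
  · intro h
    have hnc : 0 < nc := lt_of_le_of_lt hr0 hr
    have haq : a = qi := by
      by_cases h1 : a < qi
      · exfalso
        have h2 : (a + 1) * nc ≤ qi * nc := mul_le_mul_of_nonneg_right (by omega) hnc.le
        have h3 : (a + 1) * nc = a * nc + nc := by ring
        linarith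
      by_cases h2 : qi < a
      · exfalso
        have h3 : (qi + 1) * nc ≤ a * nc := mul_le_mul_of_nonneg_right (by omega) hnc.le
        have h4 : (qi + 1) * nc = qi * nc + nc := by ring
        linarith
      omega
    subst haq
    exact ⟨rfl, by linarith⟩
  · rintro ⟨h1, h2⟩; rw [h1, h2]

-- ceil(n / bs) as B computes it, bracketed
lemma nc_bracket (n bs : Int) (hbs : 0 < bs) :
    (-(PySem.Int.floordiv (-n) bs) - 1) * bs < n ∧ n ≤ -(PySem.Int.floordiv (-n) bs) * bs :=
  (PySem.Int.neg_floordiv_neg_eq_iff_of_pos hbs).mp rfl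

lemma nc_pos (n bs : Int) (hn : 1 ≤ n) (hbs : 0 < bs) : 0 < -(PySem.Int.floordiv (-n) bs) := by
  obtain ⟨-, h2⟩ := nc_bracket n bs hbs
  by_contra h
  have h' : -(PySem.Int.floordiv (-n) bs) ≤ 0 := by omega
  have h2' : -(PySem.Int.floordiv (-n) bs) * bs ≤ 0 * bs := mul_le_mul_of_nonneg_right h' hbs.le
  rw [zero_mul] at h2'
  linarith

-- A's corner list range(0, n, bs) as a mapped Nat range of length ceil(n/bs)
lemma corners_eq (n bs : Int) (hn : 1 ≤ n) (hbs : 0 < bs) :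
    PySem.List.pyRange 0 n bs
      = (List.range (-(PySem.Int.floordiv (-n) bs)).toNat).map (fun k : Nat => bs * (k : Int)) := by
  set nc := -(PySem.Int.floordiv (-n) bs) with hncdef
  obtain ⟨h1, h2⟩ := nc_bracket n bs hbs
  rw [PySem.List.pyRange_of_pos 0 n hbs, if_pos (by omega)]
  have hdiv : (n - 0 + bs - 1) / bs = nc := by
    rw [← PySem.Int.floordiv_eq_ediv_of_pos hbs, PySem.Int.floordiv_eq_iff_of_pos hbs]
    have e1 : (nc - 1) * bs = nc * bs - bs := by ring
    have e2 : (nc + 1) * bs = nc * bs + bs := by ring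
    constructor <;> linarith
  rw [hdiv]
  exact List.map_congr_left (by intro a _; ring)

lemma toNat_eq_iff (a : Int) (m : Nat) (h : 0 ≤ a) : a.toNat = m ↔ a = (m : Int) := by omega

-- one bucket of B's pass holds exactly A's (qi, qj) block, as the same list
lemma bucket_eq_nodes (n bs nc : Int) (hbs : 0 < bs) (hnc : 0 < nc) (hbr2 : n ≤ nc * bs)
    (qi qj : Nat) (_hqi : (qi : Int) < nc) (hqj : (qj : Int) < nc) :
    pvNodes n bs (bs * qi) (bs * qj)
      = ((PySem.List.pyRange 0 n 1).flatMap (fun x => (PySem.List.pyRange 0 n 1).map (fun y => (x, y)))).filter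
          (fun c => decide ((pvIdx bs nc c).toNat = qi * nc.toNat + qj)) := by
  have hcast : ((nc.toNat : Int)) = nc := Int.toNat_of_nonneg hnc.le
  have hdivlt : ∀ z : Int, 0 ≤ z → z < n →
      0 ≤ PySem.Int.floordiv z bs ∧ PySem.Int.floordiv z bs < nc := by
    intro z hz0 hzn
    constructor
    · rw [PySem.Int.le_floordiv_iff_mul_le hbs]; linarith
    · rw [PySem.Int.floordiv_lt_iff_lt_mul hbs]; linarith
  -- rewrite the bucket predicate into the two stripe conditions
  have hpred : ∀ c ∈ (PySem.List.pyRange 0 n 1).flatMap (fun x => (PySem.List.pyRange 0 n 1).map (fun y => (x, y))),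
      decide ((pvIdx bs nc c).toNat = qi * nc.toNat + qj)
        = (decide (PySem.Int.floordiv c.1 bs = (qi : Int)) && decide (PySem.Int.floordiv c.2 bs = (qj : Int))) := by
    rintro ⟨x, y⟩ hc
    obtain ⟨hx, hy⟩ := List.mem_product.mp hc
    rw [PySem.List.mem_pyRange_one] at hx hy
    obtain ⟨ha0, ha1⟩ := hdivlt x hx.1 hx.2
    obtain ⟨hb0, hb1⟩ := hdivlt y hy.1 hy.2
    have h0 : 0 ≤ pvIdx bs nc (x, y) := by
      unfold pvIdx; dsimp only; positivity
    have hcm : ((qi * nc.toNat + qj : Nat) : Int) = (qi : Int) * nc + qj := by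
      push_cast [hcast]; ring
    rw [← Bool.decide_and]
    apply decide_eq_decide.mpr
    rw [toNat_eq_iff _ _ h0, hcm]
    unfold pvIdx
    exact idx_unique nc _ _ _ _ ha0 hb0 hb1 (by positivity) (by positivity) hqj
  rw [List.filter_congr hpred, List.filter_flatMap]
  -- per row x, keep the row iff x lies in stripe qi, then cut the columns to stripe qj
  have hrow : ∀ x ∈ PySem.List.pyRange 0 n 1,
      ((PySem.List.pyRange 0 n 1).map (fun y => (x, y))).filter
          (fun c => decide (PySem.Int.floordiv c.1 bs = (qi : Int)) && decide (PySem.Int.floordiv c.2 bs = (qj : Int)))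
        = if decide (PySem.Int.floordiv x bs = (qi : Int))
            then ((PySem.List.pyRange 0 n 1).filter (fun y => decide (PySem.Int.floordiv y bs = (qj : Int)))).map (fun y => (x, y))
            else [] := by
    intro x _
    rw [List.filter_map]
    by_cases hx : PySem.Int.floordiv x bs = (qi : Int) <;> simp [Function.comp_def, hx]
  rw [List.flatMap_congr hrow, flatMap_if,
    filter_div_range n bs qi hbs (by positivity), filter_div_range n bs qj hbs (by positivity)]
  unfold pvNodes
  rw [mul_comm bs ((qi : Nat) : Int), mul_comm bs ((qj : Nat) : Int)]
  have hnd2 : ((PySem.List.pyRange ((qi : Int) * bs) (min ((qi : Int) * bs + bs) n) 1).flatMap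
      (fun x => (PySem.List.pyRange ((qj : Int) * bs) (min ((qj : Int) * bs + bs) n) 1).map (fun y => (x, y)))).Nodup :=
    List.Nodup.product (PySem.List.nodup_pyRange_one _ _) (PySem.List.nodup_pyRange_one _ _)
  rw [PySem.Set.ofList_eq_self_of_nodup _ hnd2]

-- per-level core: B's bucketing pass produces exactly A's block list
lemma level_eq (n bs : Int) (hn : 1 ≤ n) (hbs : 0 < bs) : pvBlocksA n bs = pvBucketsB n bs := by
  set nc := -(PySem.Int.floordiv (-n) bs) with hncdef
  obtain ⟨hbr1, hbr2⟩ := nc_bracket n bs hbs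
  have hnc : 0 < nc := nc_pos n bs hn hbs
  have hcast : ((nc.toNat : Int)) = nc := Int.toNat_of_nonneg hnc.le
  -- bounds of the index map on the coordinate grid
  have hdivlt : ∀ z : Int, 0 ≤ z → z < n → 0 ≤ PySem.Int.floordiv z bs ∧ PySem.Int.floordiv z bs < nc := by
    intro z hz0 hzn
    constructor
    · rw [PySem.Int.le_floordiv_iff_mul_le hbs]; linarith
    · rw [PySem.Int.floordiv_lt_iff_lt_mul hbs]; linarith
  have hidx : ∀ c : Int × Int, c.1 ∈ PySem.List.pyRange 0 n 1 → c.2 ∈ PySem.List.pyRange 0 n 1 →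
      0 ≤ pvIdx bs nc c ∧ pvIdx bs nc c < nc * nc := by
    rintro ⟨x, y⟩ hx hy
    rw [PySem.List.mem_pyRange_one] at hx hy
    obtain ⟨ha0, ha1⟩ := hdivlt x hx.1 hx.2
    obtain ⟨hb0, hb1⟩ := hdivlt y hy.1 hy.2
    unfold pvIdx
    constructor
    · positivity
    · have h2 : (PySem.Int.floordiv x bs + 1) * nc ≤ nc * nc := by
        rw [mul_comm nc nc]
        exact mul_le_mul_of_nonneg_right (by omega) hnc.le
      have h3 : (PySem.Int.floordiv x bs + 1) * nc = PySem.Int.floordiv x bs * nc + nc := by ring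
      linarith
  -- the coordinate grid
  set coords := (PySem.List.pyRange 0 n 1).flatMap (fun x => (PySem.List.pyRange 0 n 1).map (fun y => (x, y))) with hcoords
  have hcnd : coords.Nodup := List.Nodup.product (PySem.List.nodup_pyRange_one 0 n) (PySem.List.nodup_pyRange_one 0 n)
  have hmemc : ∀ c : Int × Int, c ∈ coords → c.1 ∈ PySem.List.pyRange 0 n 1 ∧ c.2 ∈ PySem.List.pyRange 0 n 1 := by
    rintro ⟨x, y⟩ hc
    exact List.mem_product.mp hc
  -- run the bucketing pass
  have hrep : ((nc * nc).toNat : Nat) = nc.toNat * nc.toNat := Int.toNat_mul hnc.le hnc.le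
  obtain ⟨hlen, hgetD⟩ := bucket_fold (pvIdx bs nc) coords
      (List.replicate (nc * nc).toNat (PySem.Set.empty : PySem.Set (Int × Int)))
      hcnd
      (by
        intro c hc
        obtain ⟨h1, h2⟩ := hmemc c hc
        obtain ⟨hi0, hi1⟩ := hidx c h1 h2
        simp only [List.length_replicate]
        generalize hA : pvIdx bs nc c = a at hi0 hi1
        generalize nc * nc = m at hi1 ⊢
        omega)
      (by intro c _; rw [getD_replicate_nil]; simp)
  -- the final bucket list, bucket by bucket
  have hbuckets : pvBucketsB n bs
      = (List.range (nc.toNat * nc.toNat)).map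
          (fun t => coords.filter (fun c => decide ((pvIdx bs nc c).toNat = t))) := by
    unfold pvBucketsB
    dsimp only
    rw [← hncdef, ← hcoords]
    apply List.ext_getElem
    · rw [hlen]; simp [hrep]
    · intro i h1 h2
      rw [← List.getD_eq_getElem _ [] h1, hgetD i, getD_replicate_nil, List.nil_append]
      simp only [List.getElem_map, List.getElem_range]
  rw [hbuckets, map_range_mul]
  -- A's side: corner list as a Nat range
  unfold pvBlocksA
  rw [corners_eq n bs hn hbs, ← hncdef, List.flatMap_map]
  refine List.flatMap_congr ?_
  intro qi hqi
  rw [List.map_map]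
  refine List.map_congr_left ?_
  intro qj hqj
  rw [List.mem_range] at hqi hqj
  have hqi' : (qi : Int) < nc := by omega
  have hqj' : (qj : Int) < nc := by omega
  exact bucket_eq_nodes n bs nc hbs hnc hbr2 qi qj hqi' hqj'

-- The inner-fold body of each level collapses to a single defaultdict append of the whole block list.
lemma modify_modify {κ ν : Type} [BEq κ] [LawfulBEq κ] (d : PySem.Dict κ (List ν)) (k : κ)
    (f g : List ν → List ν) :
    (d.modify k [] f).modify k [] g = d.modify k [] (fun l => g (f l)) := by
  simp [PySem.Dict.modify, PySem.Dict.insert_insert_self, PySem.Dict.getD_insert_self]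

lemma foldl_modify_append {κ ν ι : Type} [BEq κ] [LawfulBEq κ] (k : κ) (g : ι → List ν)
    (l : List ι) : ∀ (d : PySem.Dict κ (List ν)), l ≠ [] →
      l.foldl (fun h i => h.modify k [] (fun acc => acc ++ g i)) d
        = d.modify k [] (fun acc => acc ++ l.flatMap g) := by
  induction l with
  | nil => intro d h; exact absurd rfl h
  | cons i tl ih =>
    intro d _
    rw [List.foldl_cons]
    cases tl with
    | nil =>
      rw [List.foldl_nil]
      congr 1; funext acc; simp
    | cons j tl' =>
      rw [ih _ (by simp), modify_modify]
      congr 1; funext acc; simp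

lemma foldl_append_modify_items {κ ν ι : Type} [BEq κ] [LawfulBEq κ]
    (L : List ι) : ∀ (key : ι → κ) (blocks : ι → List ν) (d : PySem.Dict κ (List ν)),
      (∀ a ∈ L, d.contains (key a) = false) → (L.map key).Nodup →
      (L.foldl (fun h a => h.modify (key a) [] (fun l => l ++ blocks a)) d).items
        = d.items ++ L.map (fun a => (key a, blocks a)) := by
  induction L with
  | nil => intro key blocks d _ _; simp
  | cons a L ih =>
    intro key blocks d hf hnd
    have hc : d.contains (key a) = false := hf a (by simp)
    have hmod : PySem.Dict.modify d (key a) [] (fun l => l ++ blocks a)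
        = d.insert (key a) (blocks a) := by
      simp [PySem.Dict.modify, PySem.Dict.getD_of_not_contains d _ hc]
    have hnd2 : (List.map key (a :: L)).Nodup := hnd
    rw [List.map_cons, List.nodup_cons] at hnd2
    have hfresh : ∀ b ∈ L, (d.insert (key a) (blocks a)).contains (key b) = false := by
      intro b hb
      rw [PySem.Dict.contains_insert]
      have hne : key b ≠ key a := by
        intro he
        exact hnd2.1 (by rw [← he]; exact List.mem_map_of_mem hb)
      simp [hne, hf b (by simp [hb])]
    rw [List.foldl_cons, hmod, ih key blocks _ hfresh hnd2.2]
    rw [PySem.Dict.items_insert_of_not_contains d _ hc]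
    simp

lemma key_map_nodup (L : List Int) (h : L.Nodup) :
    (L.map (fun level => ((level, (2 : Int)) : Int × Int))).Nodup :=
  h.map (fun _ _ hab => congrArg Prod.fst hab)

-- ===== VERDICT (by name: the statement is the Claim_ definition above) =====
theorem generate_type1_submeshes_spec : Claim_equal_generate_type1_submeshes := by
  unfold Claim_equal_generate_type1_submeshes
  intro size hdom hpre
  unfold Pre_generate_type1_submeshes at hpre
  unfold Spec_generate_type1_submeshes
  unfold generate_type1_submeshes generate_type1_submeshes_alt
  dsimp only
  set L := PySem.List.pyRange 0 ((Nat.log2 size.toNat : Int) + 1) 1 with hL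
  have hknd := key_map_nodup L (PySem.List.nodup_pyRange_one _ _)
  -- collapse A's per-level double fold into one defaultdict append of pvBlocksA
  have hAbody : ∀ (acc : PySem.Dict (Int × Int) (List (List (Int × Int)))), ∀ level ∈ L,
      (PySem.List.pyRange 0 size (2 ^ level.toNat)).foldl (fun h i =>
        (PySem.List.pyRange 0 size (2 ^ level.toNat)).foldl (fun h j =>
          PySem.Dict.modify h (level, 2) [] (fun l => l ++
            [PySem.Set.ofList ((PySem.List.pyRange i (min (i + 2 ^ level.toNat) size) 1).flatMap
              (fun x => (PySem.List.pyRange j (min (j + 2 ^ level.toNat) size) 1).map (fun y => (x, y))))]))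
          h) acc
      = PySem.Dict.modify acc (level, 2) [] (fun l => l ++ pvBlocksA size (2 ^ level.toNat)) := by
    intro acc level _
    have hbs : (0 : Int) < 2 ^ level.toNat := by positivity
    have hne : PySem.List.pyRange 0 size (2 ^ level.toNat) ≠ [] :=
      List.ne_nil_of_mem ((PySem.List.mem_pyRange_iff_of_pos hbs 0).mpr ⟨le_refl 0, by omega, by simp⟩)
    rw [PySem.List.foldl_congr_mem _ _ (fun h i => PySem.Dict.modify h (level, 2) []
        (fun l => l ++ (PySem.List.pyRange 0 size (2 ^ level.toNat)).map
          (fun j => pvNodes size (2 ^ level.toNat) i j))) _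
      (by
        intro acc' i _
        rw [foldl_modify_append _ _ _ _ hne]
        congr 1; funext l
        rw [← List.map_eq_flatMap]
        rfl)]
    rw [foldl_modify_append _ _ _ _ hne]
    rfl
  rw [PySem.List.foldl_congr_mem L _ (fun h level =>
      PySem.Dict.modify h (level, 2) [] (fun l => l ++ pvBlocksA size (2 ^ level.toNat))) _ hAbody]
  -- B's per-level buckets are pvBucketsB
  have hBbody : ∀ (acc : PySem.Dict (Int × Int) (List (List (Int × Int)))), ∀ level ∈ L,
      PySem.Dict.insert acc (level, 2)
        ((PySem.List.pyRange 0 size 1).foldl (fun bkts x =>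
            (PySem.List.pyRange 0 size 1).foldl (fun bkts y =>
              PySem.List.pySetD bkts (PySem.Int.floordiv x (2 ^ level.toNat) * -(PySem.Int.floordiv (-size) (2 ^ level.toNat)) + PySem.Int.floordiv y (2 ^ level.toNat))
                (PySem.Set.add (PySem.List.pyGetD bkts (PySem.Int.floordiv x (2 ^ level.toNat) * -(PySem.Int.floordiv (-size) (2 ^ level.toNat)) + PySem.Int.floordiv y (2 ^ level.toNat)) PySem.Set.empty) (x, y)))
              bkts)
          (List.replicate ((-(PySem.Int.floordiv (-size) (2 ^ level.toNat)) * -(PySem.Int.floordiv (-size) (2 ^ level.toNat))).toNat) (PySem.Set.empty : PySem.Set (Int × Int))))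
      = PySem.Dict.insert acc (level, 2) (pvBucketsB size (2 ^ level.toNat)) := by
    intro acc level _
    congr 1
    simp only [pvBucketsB, pvIdx, List.foldl_flatMap, List.foldl_map]
  rw [PySem.List.foldl_congr_mem L _ (fun h level =>
      PySem.Dict.insert h (level, 2) (pvBucketsB size (2 ^ level.toNat))) _ hBbody]
  -- turn both dictionary folds into item lists
  rw [foldl_append_modify_items L (fun level => ((level, (2 : Int)) : Int × Int))
      (fun level => pvBlocksA size (2 ^ level.toNat)) _
      (by intro a _; exact PySem.Dict.contains_empty _) hknd]
  rw [PySem.Dict.items_foldl_insert_fresh L (fun level => ((level, (2 : Int)) : Int × Int))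
      (fun level => pvBucketsB size (2 ^ level.toNat)) _
      (by intro a _; exact PySem.Dict.contains_empty _) hknd]
  -- per level, the block lists agree
  apply congrArg
  apply congrArg
  refine List.map_congr_left ?_
  intro level _
  have hbs : (0 : Int) < 2 ^ level.toNat := by positivity
  rw [level_eq size (2 ^ level.toNat) hpre hbs]
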